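-- pv_equiv track=rewrite | github.com/joergklausen/mkndaq | tests/test_network_inventory.py | _split_host_value
-- ===== SOURCE A (Python) =====
-- def _split_host_value(value: object) -> list[str]:
--     if value in (None, "", []):
--         return []
--     if isinstance(value, str):
--         return [part.strip() for part in value.split(",") if part.strip()]
--     if isinstance(value, (list, tuple, set)):
--         out: list[str] = []
--         for item in value:
--             out.extend(_split_host_value(item))
--         return out
--     return [str(value).strip()]
-- ===== SOURCE B (Python) =====
-- def _split_host_value(value):
--     # One pass over the characters, cutting tokens at commas; no split()/comprehension.
--     if value is None:
--         return []
--     out = []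
--     token = []
--     for ch in value:
--         if ch == ",":
--             t = "".join(token).strip()
--             if t:
--                 out.append(t)
--             token = []
--         else:
--             token.append(ch)
--     t = "".join(token).strip()
--     if t:
--         out.append(t)
--     return out
-- ===== Notes on version B (the rewrite author's own statement) =====
-- stated objective: alternative
-- what changed: Replaces A's split-on-comma plus strip/filter comprehension by a single left-to-right character scan that accumulates a token and flushes it (stripped, if nonempty) at each comma and at the end.
import Mathlib
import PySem

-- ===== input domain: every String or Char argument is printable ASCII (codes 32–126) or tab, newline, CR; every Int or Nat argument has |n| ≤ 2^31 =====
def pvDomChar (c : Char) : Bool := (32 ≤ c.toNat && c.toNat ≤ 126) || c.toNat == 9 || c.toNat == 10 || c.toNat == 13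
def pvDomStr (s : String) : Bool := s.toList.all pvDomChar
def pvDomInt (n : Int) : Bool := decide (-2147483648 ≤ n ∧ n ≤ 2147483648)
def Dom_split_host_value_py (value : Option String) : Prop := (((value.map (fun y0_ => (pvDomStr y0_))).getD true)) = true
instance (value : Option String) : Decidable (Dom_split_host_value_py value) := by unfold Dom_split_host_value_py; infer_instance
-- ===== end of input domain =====

-- B rewrites A's split-comprehension as a single left-to-right character scan cutting tokens at commas (objective: alternative decomposition, same cost).
-- Both ports work on `s.toList`; PySem.Str functions are thin wrappers over the PySem.Chars ones used here (exact per PYSEM.md).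

-- ===== PORT A =====
-- value in (None, "", []) → the none case and the s = "" test; the isinstance(list/tuple/set)
-- and final str(value) branches are unreachable for an Option String argument.
def split_host_value_py (value : Option String) : List String :=
  match value with
  | none => []
  | some s =>
    if s = "" then []
    else
      -- [part.strip() for part in value.split(",") if part.strip()]
      ((PySem.Chars.splitOn s.toList ",".toList).filter
          (fun p => PySem.Chars.strip p ≠ [])).map
        (fun p => String.ofList (PySem.Chars.strip p))

-- ===== PORT B =====
-- flush: strip the pending token and append it to out if nonempty
def shvFlush (out : List String) (tok : List Char) : List String :=
  let t := PySem.Chars.strip tok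
  if t = [] then out else out ++ [String.ofList t]

-- the for-loop over the characters plus the final flush
def shvGo (out : List String) (tok : List Char) : List Char → List String
  | [] => shvFlush out tok
  | c :: rest =>
    if c = ',' then shvGo (shvFlush out tok) [] rest
    else shvGo out (tok ++ [c]) rest

def split_host_value_py_alt (value : Option String) : List String :=
  match value with
  | none => []
  | some s => shvGo [] [] s.toList

-- ===== PRECONDITION & SPEC =====
def Spec_split_host_value_py (value : Option String) (out : List String) : Prop := out = split_host_value_py_alt value
instance (value : Option String) (out : List String) : Decidable (Spec_split_host_value_py value out) := by unfold Spec_split_host_value_py; infer_instance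

-- ===== CLAIM (what is proved, stated in full; the proofs are below) =====
def Claim_equal_split_host_value_py : Prop := ∀ (value : Option String), Dom_split_host_value_py value → Spec_split_host_value_py value (split_host_value_py value)

-- ===== LEMMAS AND PROOFS =====

-- structural characterisation of splitting at commas
def shvSC : List Char → List (List Char)
  | [] => [[]]
  | c :: rest => if c = ',' then [] :: shvSC rest else (shvSC rest).modifyHead (c :: ·)

lemma shvSC_ne_nil (l : List Char) : shvSC l ≠ [] := by
  cases l with
  | nil => simp [shvSC]
  | cons c rest =>
    simp only [shvSC]
    split <;> cases h : shvSC rest <;> simp_all [shvSC_ne_nil rest]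

lemma shvGo_splitOn_go (sep : List Char) (hsep : sep = [','])
    (fuel : Nat) (l cur : List Char) (acc : List (List Char)) (h : l.length ≤ fuel) :
    PySem.Chars.splitOn.go sep fuel l cur acc
      = acc.reverse ++ (shvSC l).modifyHead (cur.reverse ++ ·) := by
  induction fuel generalizing l cur acc with
  | zero =>
    have : l = [] := by cases l <;> simp_all
    subst this
    simp [PySem.Chars.splitOn.go, shvSC]
  | succ fuel ih =>
    cases l with
    | nil => simp [PySem.Chars.splitOn.go, shvSC]
    | cons c rest =>
      subst hsep
      by_cases hc : c = ','
      · subst hc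
        have hpre : List.isPrefixOf [','] (',' :: rest) = true := by simp [List.isPrefixOf]
        simp only [PySem.Chars.splitOn.go, hpre, if_pos]
        rw [ih _ _ _ (by simpa using Nat.le_of_succ_le_succ h)]
        cases hsc : shvSC rest <;> simp [shvSC, hsc]
      · have hpre : List.isPrefixOf [','] (c :: rest) = false := by
          simp only [List.isPrefixOf, Bool.and_eq_false_iff, beq_eq_false_iff_ne, ne_eq]
          exact Or.inl (fun h' => hc h'.symm)
        simp only [PySem.Chars.splitOn.go, hpre]
        rw [ih rest (c :: cur) acc (by simpa using Nat.le_of_succ_le_succ h)]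
        cases hsc : shvSC rest with
        | nil => exact absurd hsc (shvSC_ne_nil rest)
        | cons x xs => simp [shvSC, hc, hsc]

lemma splitOn_comma_eq_shvSC (l : List Char) :
    PySem.Chars.splitOn l ",".toList = shvSC l := by
  have := shvGo_splitOn_go ",".toList (by decide) (l.length + 1) l [] [] (by omega)
  simp only [PySem.Chars.splitOn] at *
  rw [this]
  cases h : shvSC l with
  | nil => exact absurd h (shvSC_ne_nil l)
  | cons x xs => simp

-- A's post-processing of the parts
def shvF (parts : List (List Char)) : List String :=
  (parts.filter (fun p => PySem.Chars.strip p ≠ [])).map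
    (fun p => String.ofList (PySem.Chars.strip p))

lemma shvGo_eq (cs : List Char) : ∀ (out : List String) (tok : List Char),
    shvGo out tok cs = out ++ shvF ((shvSC cs).modifyHead (tok ++ ·)) := by
  induction cs with
  | nil =>
    intro out tok
    simp only [shvGo, shvSC, List.modifyHead, shvFlush, shvF]
    split <;> simp_all [List.filter, List.map]
  | cons c rest ih =>
    intro out tok
    by_cases hc : c = ','
    · subst hc
      simp only [shvGo, shvSC, ih]
      cases h : shvSC rest with
      | nil => exact absurd h (shvSC_ne_nil rest)
      | cons x xs =>
        by_cases ht : PySem.Chars.strip tok = [] <;>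
          simp [shvFlush, shvF, ht, List.filter_cons]
    · simp only [shvGo, if_neg hc, ih, shvSC]
      cases h : shvSC rest with
      | nil => exact absurd h (shvSC_ne_nil rest)
      | cons x xs => simp

lemma modifyHead_nil_append (l : List (List Char)) :
    l.modifyHead ((([] : List Char)) ++ ·) = l := by
  cases l <;> simp

-- ===== VERDICT (by name: the statement is the Claim_ definition above) =====
theorem split_host_value_py_spec : Claim_equal_split_host_value_py := by
  intro value _
  unfold Spec_split_host_value_py split_host_value_py split_host_value_py_alt
  match value with
  | none => rfl
  | some s =>
    simp only
    rw [shvGo_eq, modifyHead_nil_append, ← splitOn_comma_eq_shvSC]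
    by_cases hs : s = ""
    · subst hs; simp [PySem.Chars.splitOn, PySem.Chars.splitOn.go, shvF, PySem.Chars.strip,
        PySem.Chars.lstrip, PySem.Chars.rstrip]
    · simp [hs, shvF]
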